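-- pv_equiv track=rewrite | github.com/shubofan/LeetcodePython | HashMap/1640.Check Array Formation Through Concatenation.py | canFormArray
-- ===== SOURCE A (Python) =====
-- from typing import List
--
-- def canFormArray(arr: List[int], pieces: List[List[int]]) -> bool:
-- 	pieces.sort(key=lambda x: -len(x))  # Sort by decreasing order of length of pieces to avoid
-- 	# case an bigger array contains another array, but bigger array is processed later
--
-- 	m = sum(len(p) for p in pieces)
-- 	seen = set()
--
-- 	n = len(arr)
-- 	i = 0
-- 	while i < n:
-- 		good = False
-- 		for j, p in enumerate(pieces):
-- 			if j in seen: continue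
-- 			if arr[i:i + len(p)] == p:
-- 				good = True
-- 				i += len(p)
-- 				seen.add(j)
-- 				break
-- 		if not good: return False
-- 	return i == m
-- ===== SOURCE B (Python) =====
-- def canFormArray(arr, pieces):
--     # Bucket the non-empty pieces by first element (longer pieces first, as ties
--     # among equal first elements must prefer the longer piece); then one pass over
--     # arr, matching only candidates whose first element is arr[i].
--     buckets = {}
--     for p in sorted(pieces, key=lambda x: -len(x)):
--         if p:
--             buckets.setdefault(p[0], []).append(p)
--     total = sum(len(p) for p in pieces)
--     i, n = 0, len(arr)
--     while i < n:
--         cands = buckets.get(arr[i], [])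
--         for k, p in enumerate(cands):
--             if arr[i:i + len(p)] == p:
--                 cands.pop(k)
--                 i += len(p)
--                 break
--         else:
--             return False
--     return i == total
-- ===== Notes on version B (the rewrite author's own statement) =====
-- stated objective: alternative
-- what changed: Instead of rescanning the whole pieces list (guarded by a seen-index set) at every position of arr, B buckets the non-empty pieces once in a dict keyed by first element (longer pieces first) and does a single pass over arr that only inspects the bucket of arr[i], popping each used piece; B does not mutate pieces (A sorts it in place) - the equivalence is about the return value.
import Mathlib
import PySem

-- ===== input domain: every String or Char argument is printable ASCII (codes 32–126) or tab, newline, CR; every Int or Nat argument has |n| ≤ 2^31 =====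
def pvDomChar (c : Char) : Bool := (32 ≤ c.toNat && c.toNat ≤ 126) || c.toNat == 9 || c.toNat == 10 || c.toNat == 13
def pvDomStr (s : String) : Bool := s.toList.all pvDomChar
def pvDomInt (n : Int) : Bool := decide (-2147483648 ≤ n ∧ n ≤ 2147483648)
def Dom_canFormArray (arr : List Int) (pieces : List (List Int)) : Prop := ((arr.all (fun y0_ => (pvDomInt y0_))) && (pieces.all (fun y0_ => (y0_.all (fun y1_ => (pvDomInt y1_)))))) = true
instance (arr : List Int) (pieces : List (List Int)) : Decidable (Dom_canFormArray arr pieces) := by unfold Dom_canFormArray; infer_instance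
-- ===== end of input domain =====

-- B buckets the non-empty pieces once by first element (longer first) and verifies arr in one
-- pass scanning only the bucket of arr[i]; A rescans all pieces at every position. Equivalence
-- is about the RETURN value: A sorts `pieces` in place, B leaves it untouched.

-- ===== PORT A =====
-- inner `for j, p in enumerate(pieces): if j in seen: continue; if arr[i:i+len(p)] == p: ...`
-- returns the matched (j, p) (the `break` state), or none (`good` stays False)
def canFormArrayFind (arr : List Int) (i : Int) (seen : PySem.Set Int) :
    Int → List (List Int) → Option (Int × List Int)
  | _, [] => none
  | j, p :: rest =>
    if PySem.Set.contains seen j then canFormArrayFind arr i seen (j + 1) rest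
    else if PySem.List.slice arr (some i) (some (i + (p.length : Int))) = p then some (j, p)
    else canFormArrayFind arr i seen (j + 1) rest

-- the `while i < n` loop; fuel = n + len(pieces) + 1 is a pure totality guard, never
-- exhausted: every iteration either advances i (bounded by n) or marks a fresh index seen
def canFormArrayLoop (arr : List Int) (sortedP : List (List Int)) (n m : Int) :
    Nat → Int → PySem.Set Int → Bool
  | 0, _, _ => false
  | fuel + 1, i, seen =>
    if i < n then
      match canFormArrayFind arr i seen 0 sortedP with
      | none => false
      | some (j, p) => canFormArrayLoop arr sortedP n m fuel (i + (p.length : Int)) (PySem.Set.add seen j)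
    else decide (i = m)

def canFormArray (arr : List Int) (pieces : List (List Int)) : Bool :=
  let sortedP := PySem.List.sorted pieces (fun x => -(x.length : Int)) false
  let m : Int := (sortedP.map (fun p => (p.length : Int))).sum
  canFormArrayLoop arr sortedP (arr.length : Int) m (arr.length + sortedP.length + 1) 0 PySem.Set.empty

-- ===== PORT B =====
-- inner `for k, p in enumerate(cands): if arr[i:i+len(p)] == p: cands.pop(k); break`:
-- returns the matched piece together with the bucket with that piece popped, or none
def canFormArrayScan (arr : List Int) (i : Int) :
    List (List Int) → Option (List Int × List (List Int))
  | [] => none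
  | p :: rest =>
    if PySem.List.slice arr (some i) (some (i + (p.length : Int))) = p then some (p, rest)
    else
      match canFormArrayScan arr i rest with
      | none => none
      | some (q, rest') => some (q, p :: rest')

-- the `while i < n` loop; fuel = n + 1 is a pure totality guard, never exhausted:
-- buckets hold only non-empty pieces, so every iteration strictly advances i
def canFormArrayAltLoop (arr : List Int) (n total : Int) :
    Nat → Int → PySem.Dict Int (List (List Int)) → Bool
  | 0, _, _ => false
  | fuel + 1, i, buckets =>
    if i < n then
      -- arr[i]: 0 ≤ i < n whenever this branch runs, so the default is never used
      let x := PySem.List.pyGetD arr i 0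
      match canFormArrayScan arr i (buckets.getD x []) with
      | none => false
      | some (p, rest) => canFormArrayAltLoop arr n total fuel (i + (p.length : Int)) (buckets.insert x rest)
    else decide (i = total)

def canFormArray_alt (arr : List Int) (pieces : List (List Int)) : Bool :=
  let sortedP := PySem.List.sorted pieces (fun x => -(x.length : Int)) false
  -- buckets.setdefault(p[0], []).append(p) for the non-empty pieces
  let buckets := sortedP.foldl
    (fun d p => match p with
      | [] => d
      | q :: _ => d.modify q [] (fun l => l ++ [p]))
    PySem.Dict.empty
  let total : Int := (pieces.map (fun p => (p.length : Int))).sum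
  canFormArrayAltLoop arr (arr.length : Int) total (arr.length + 1) 0 buckets

-- ===== PRECONDITION & SPEC =====
def Spec_canFormArray (arr : List Int) (pieces : List (List Int)) (out : Bool) : Prop := out = canFormArray_alt arr pieces
instance (arr : List Int) (pieces : List (List Int)) (out : Bool) : Decidable (Spec_canFormArray arr pieces out) := by unfold Spec_canFormArray; infer_instance

-- ===== CLAIM (what is proved, stated in full; the proofs are below) =====
def Claim_equal_canFormArray : Prop := ∀ (arr : List Int) (pieces : List (List Int)), Dom_canFormArray arr pieces → Spec_canFormArray arr pieces (canFormArray arr pieces)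

-- ===== LEMMAS AND PROOFS =====

-- the pieces whose index (counting from j) is not yet in `seen`, in order
def cfaUnused (seen : PySem.Set Int) : Int → List (List Int) → List (List Int)
  | _, [] => []
  | j, p :: rest =>
    if PySem.Set.contains seen j then cfaUnused seen (j + 1) rest
    else p :: cfaUnused seen (j + 1) rest

-- first piece of the list matching arr at position i
def cfaFM (arr : List Int) (i : Int) : List (List Int) → Option (List Int)
  | [] => none
  | p :: rest =>
    if PySem.List.slice arr (some i) (some (i + (p.length : Int))) = p then some p
    else cfaFM arr i rest

-- the list with its first matching piece removed
def cfaErase (arr : List Int) (i : Int) : List (List Int) → List (List Int)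
  | [] => []
  | p :: rest =>
    if PySem.List.slice arr (some i) (some (i + (p.length : Int))) = p then rest
    else p :: cfaErase arr i rest

-- membership test of B's bucket keyed x: non-empty with first element x
def cfaBkt (x : Int) : List Int → Bool
  | [] => false
  | a :: _ => a == x

lemma cfaUnused_empty : ∀ (l : List (List Int)) (j : Int),
    cfaUnused PySem.Set.empty j l = l
  | [], _ => rfl
  | p :: rest, j => by
    simp only [cfaUnused]
    rw [if_neg (by simp [PySem.Set.empty, PySem.Set.contains])]
    rw [cfaUnused_empty rest (j + 1)]

lemma cfaUnused_sublist (seen : PySem.Set Int) : ∀ (l : List (List Int)) (j : Int),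
    (cfaUnused seen j l).Sublist l
  | [], _ => List.Sublist.refl _
  | p :: rest, j => by
    simp only [cfaUnused]
    by_cases hc : PySem.Set.contains seen j = true
    · rw [if_pos hc]
      exact (cfaUnused_sublist seen rest (j + 1)).cons p
    · rw [if_neg hc]
      exact (cfaUnused_sublist seen rest (j + 1)).cons₂ p

lemma cfaUnused_add_lt (seen : PySem.Set Int) : ∀ (l : List (List Int)) (j x : Int), x < j →
    cfaUnused (PySem.Set.add seen x) j l = cfaUnused seen j l
  | [], _, _, _ => rfl
  | p :: rest, j, x, hx => by
    have hiff : PySem.Set.contains (PySem.Set.add seen x) j = PySem.Set.contains seen j := by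
      by_cases hm : j ∈ seen
      · rw [(PySem.Set.contains_iff _ _).mpr hm,
          (PySem.Set.contains_iff _ _).mpr ((PySem.Set.mem_add _ _ _).mpr (Or.inl hm))]
      · have h1 : ¬ j ∈ PySem.Set.add seen x := fun hy => by
          rcases (PySem.Set.mem_add _ _ _).mp hy with h2 | h2
          · exact hm h2
          · omega
        rw [Bool.eq_iff_iff]
        simp [hm, h1]
    simp only [cfaUnused, hiff]
    rw [cfaUnused_add_lt seen rest (j + 1) x (by omega)]

lemma cfaFind_ge (arr : List Int) (i : Int) (seen : PySem.Set Int) :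
    ∀ (l : List (List Int)) (j j₀ : Int) (p : List Int),
      canFormArrayFind arr i seen j l = some (j₀, p) → j ≤ j₀
  | [], _, _, _, h => by simp [canFormArrayFind] at h
  | q :: rest, j, j₀, p, h => by
    simp only [canFormArrayFind] at h
    by_cases hc : PySem.Set.contains seen j = true
    · rw [if_pos hc] at h
      have := cfaFind_ge arr i seen rest (j + 1) j₀ p h
      omega
    · rw [if_neg hc] at h
      by_cases hs : PySem.List.slice arr (some i) (some (i + (q.length : Int))) = q
      · rw [if_pos hs] at h
        simp only [Option.some.injEq, Prod.mk.injEq] at h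
        omega
      · rw [if_neg hs] at h
        have := cfaFind_ge arr i seen rest (j + 1) j₀ p h
        omega

lemma cfaFind_map (arr : List Int) (i : Int) (seen : PySem.Set Int) :
    ∀ (l : List (List Int)) (j : Int),
      (canFormArrayFind arr i seen j l).map Prod.snd = cfaFM arr i (cfaUnused seen j l)
  | [], _ => rfl
  | p :: rest, j => by
    simp only [canFormArrayFind, cfaUnused]
    by_cases hc : PySem.Set.contains seen j = true
    · rw [if_pos hc, if_pos hc]
      exact cfaFind_map arr i seen rest (j + 1)
    · rw [if_neg hc, if_neg hc]
      by_cases hs : PySem.List.slice arr (some i) (some (i + (p.length : Int))) = p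
      · rw [if_pos hs]
        simp [cfaFM, hs]
      · rw [if_neg hs]
        simp only [cfaFM, hs, if_false]
        exact cfaFind_map arr i seen rest (j + 1)

lemma cfaFind_erase (arr : List Int) (i : Int) (seen : PySem.Set Int) :
    ∀ (l : List (List Int)) (j j₀ : Int) (p : List Int),
      canFormArrayFind arr i seen j l = some (j₀, p) →
      cfaUnused (PySem.Set.add seen j₀) j l = cfaErase arr i (cfaUnused seen j l)
  | [], _, _, _, h => by simp [canFormArrayFind] at h
  | q :: rest, j, j₀, p, h => by
    simp only [canFormArrayFind] at h
    by_cases hc : PySem.Set.contains seen j = true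
    · rw [if_pos hc] at h
      have hc' : PySem.Set.contains (PySem.Set.add seen j₀) j = true := by
        rw [PySem.Set.contains_iff]
        exact (PySem.Set.mem_add _ _ _).mpr (Or.inl ((PySem.Set.contains_iff _ _).mp hc))
      simp only [cfaUnused]
      rw [if_pos hc, if_pos hc']
      exact cfaFind_erase arr i seen rest (j + 1) j₀ p h
    · rw [if_neg hc] at h
      by_cases hs : PySem.List.slice arr (some i) (some (i + (q.length : Int))) = q
      · rw [if_pos hs] at h
        simp only [Option.some.injEq, Prod.mk.injEq] at h
        obtain ⟨rfl, -⟩ := h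
        have hc' : PySem.Set.contains (PySem.Set.add seen j) j = true := by
          rw [PySem.Set.contains_iff]
          exact (PySem.Set.mem_add _ _ _).mpr (Or.inr rfl)
        simp only [cfaUnused]
        rw [if_pos hc', if_neg hc]
        simp only [cfaErase]
        rw [if_pos hs]
        exact cfaUnused_add_lt seen rest (j + 1) j (by omega)
      · rw [if_neg hs] at h
        have hge := cfaFind_ge arr i seen rest (j + 1) j₀ p h
        have hc' : PySem.Set.contains (PySem.Set.add seen j₀) j = false := by
          rw [Bool.eq_false_iff]
          intro hcc
          rcases (PySem.Set.mem_add _ _ _).mp ((PySem.Set.contains_iff _ _).mp hcc) with h2 | h2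
          · exact hc ((PySem.Set.contains_iff _ _).mpr h2)
          · omega
        simp only [cfaUnused]
        rw [if_neg (by simp only [Bool.not_eq_true]; exact hc'), if_neg hc]
        simp only [cfaErase]
        rw [if_neg hs]
        rw [cfaFind_erase arr i seen rest (j + 1) j₀ p h]

lemma cfaFM_none_iff (arr : List Int) (i : Int) : ∀ (l : List (List Int)),
    cfaFM arr i l = none ↔ ∀ p ∈ l, PySem.List.slice arr (some i) (some (i + (p.length : Int))) ≠ p
  | [] => by simp [cfaFM]
  | p :: rest => by
    simp only [cfaFM]
    by_cases hs : PySem.List.slice arr (some i) (some (i + (p.length : Int))) = p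
    · simp [hs]
    · simp [hs, cfaFM_none_iff arr i rest]

lemma cfaFM_some (arr : List Int) (i : Int) : ∀ (l : List (List Int)) (p : List Int),
    cfaFM arr i l = some p →
    PySem.List.slice arr (some i) (some (i + (p.length : Int))) = p ∧ p ∈ l
  | [], p, h => by simp [cfaFM] at h
  | q :: rest, p, h => by
    simp only [cfaFM] at h
    by_cases hs : PySem.List.slice arr (some i) (some (i + (q.length : Int))) = q
    · rw [if_pos hs] at h
      simp only [Option.some.injEq] at h
      subst h
      exact ⟨hs, List.mem_cons_self⟩
    · rw [if_neg hs] at h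
      obtain ⟨h1, h2⟩ := cfaFM_some arr i rest p h
      exact ⟨h1, List.mem_cons_of_mem _ h2⟩

lemma cfaErase_length (arr : List Int) (i : Int) : ∀ (l : List (List Int)) (p : List Int),
    cfaFM arr i l = some p → (cfaErase arr i l).length + 1 = l.length
  | [], p, h => by simp [cfaFM] at h
  | q :: rest, p, h => by
    simp only [cfaFM] at h
    by_cases hs : PySem.List.slice arr (some i) (some (i + (q.length : Int))) = q
    · simp only [cfaErase]
      rw [if_pos hs]
      simp
    · rw [if_neg hs] at h
      simp only [cfaErase]
      rw [if_neg hs]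
      simp only [List.length_cons]
      rw [cfaErase_length arr i rest p h]

lemma cfaErase_sublist (arr : List Int) (i : Int) : ∀ (l : List (List Int)),
    (cfaErase arr i l).Sublist l
  | [] => List.Sublist.refl _
  | q :: rest => by
    simp only [cfaErase]
    by_cases hs : PySem.List.slice arr (some i) (some (i + (q.length : Int))) = q
    · rw [if_pos hs]
      exact (List.Sublist.refl rest).cons q
    · rw [if_neg hs]
      exact (cfaErase_sublist arr i rest).cons₂ q

-- a matched piece fits inside arr from position i
lemma cfa_match_le (arr : List Int) (i : Int) (p : List Int) (hi : 0 ≤ i)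
    (h : PySem.List.slice arr (some i) (some (i + (p.length : Int))) = p) :
    p.length ≤ arr.length - i.toNat := by
  rw [PySem.List.slice_toNat arr hi (by omega)] at h
  have := congrArg List.length h
  simp only [List.length_take, List.length_drop] at this
  omega

-- a non-empty matched piece starts with arr[i]
lemma cfa_match_head (arr : List Int) (i : Int) (a : Int) (t : List Int)
    (hi : 0 ≤ i) (hn : i < (arr.length : Int))
    (h : PySem.List.slice arr (some i) (some (i + ((a :: t).length : Int))) = a :: t) :
    PySem.List.pyGetD arr i 0 = a := by
  rw [PySem.List.slice_toNat arr hi (by omega)] at h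
  have h1 := congrArg List.head? h
  rw [List.head?_take, List.head?_drop] at h1
  have h2 : ((i + (((a :: t).length : Nat) : Int)).toNat - i.toNat) ≠ 0 := by
    simp only [List.length_cons] at *
    omega
  rw [if_neg h2, List.head?_cons] at h1
  rw [PySem.List.pyGetD_eq_getElem arr 0 hi (by omega)]
  have h3 : i.toNat < arr.length := by omega
  rw [List.getElem?_eq_getElem h3] at h1
  simpa using h1

-- L2: a non-empty first match is also the first match of its bucket, and erasing commutes with the bucket filter
lemma cfa_L2 (arr : List Int) (i : Int) (p : List Int)
    (hi : 0 ≤ i) (hn : i < (arr.length : Int)) (hp : p ≠ []) :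
    ∀ (U : List (List Int)), cfaFM arr i U = some p →
      cfaFM arr i (U.filter (cfaBkt (PySem.List.pyGetD arr i 0))) = some p ∧
      cfaErase arr i (U.filter (cfaBkt (PySem.List.pyGetD arr i 0))) =
        (cfaErase arr i U).filter (cfaBkt (PySem.List.pyGetD arr i 0))
  | [], h => by simp [cfaFM] at h
  | q :: rest, h => by
    simp only [cfaFM] at h
    by_cases hs : PySem.List.slice arr (some i) (some (i + (q.length : Int))) = q
    · rw [if_pos hs] at h
      simp only [Option.some.injEq] at h
      subst h
      obtain ⟨a, t, rfl⟩ : ∃ a t, q = a :: t := by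
        cases q with
        | nil => exact absurd rfl hp
        | cons a t => exact ⟨a, t, rfl⟩
      have hb : cfaBkt (PySem.List.pyGetD arr i 0) (a :: t) = true := by
        simp [cfaBkt, cfa_match_head arr i a t hi hn hs]
      constructor
      · rw [List.filter_cons_of_pos hb]
        simp only [cfaFM]
        rw [if_pos hs]
      · rw [List.filter_cons_of_pos hb]
        simp only [cfaErase]
        rw [if_pos hs, if_pos hs]
    · rw [if_neg hs] at h
      obtain ⟨ih1, ih2⟩ := cfa_L2 arr i p hi hn hp rest h
      by_cases hb : cfaBkt (PySem.List.pyGetD arr i 0) q = true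
      · constructor
        · rw [List.filter_cons_of_pos hb]
          simp only [cfaFM]
          rw [if_neg hs]
          exact ih1
        · rw [List.filter_cons_of_pos hb]
          simp only [cfaErase]
          rw [if_neg hs, ih2, if_neg hs, List.filter_cons_of_pos hb]
      · constructor
        · rw [List.filter_cons_of_neg hb]
          exact ih1
        · rw [List.filter_cons_of_neg hb, ih2]
          simp only [cfaErase]
          rw [if_neg hs, List.filter_cons_of_neg hb]

-- L2': erasing a non-empty first match leaves every other bucket unchanged
lemma cfa_L2' (arr : List Int) (i : Int) (p : List Int)
    (hi : 0 ≤ i) (hn : i < (arr.length : Int)) (hp : p ≠ []) :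
    ∀ (U : List (List Int)), cfaFM arr i U = some p →
      ∀ y, y ≠ PySem.List.pyGetD arr i 0 →
        (cfaErase arr i U).filter (cfaBkt y) = U.filter (cfaBkt y)
  | [], h => by simp [cfaFM] at h
  | q :: rest, h => by
    intro y hy
    simp only [cfaFM] at h
    by_cases hs : PySem.List.slice arr (some i) (some (i + (q.length : Int))) = q
    · rw [if_pos hs] at h
      simp only [Option.some.injEq] at h
      subst h
      obtain ⟨a, t, rfl⟩ : ∃ a t, q = a :: t := by
        cases q with
        | nil => exact absurd rfl hp
        | cons a t => exact ⟨a, t, rfl⟩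
      have ha := cfa_match_head arr i a t hi hn hs
      have hb : ¬ cfaBkt y (a :: t) = true := by
        simp only [cfaBkt, beq_iff_eq]
        omega
      simp only [cfaErase]
      rw [if_pos hs, List.filter_cons_of_neg hb]
    · rw [if_neg hs] at h
      simp only [cfaErase]
      rw [if_neg hs, List.filter_cons, List.filter_cons]
      rw [cfa_L2' arr i p hi hn hp rest h y hy]

-- L3: when the first match is the empty piece, no bucket element matches
lemma cfa_L3 (arr : List Int) (i : Int) :
    ∀ (U : List (List Int)), cfaFM arr i U = some [] →
      U.Pairwise (fun a b => b.length ≤ a.length) →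
      ∀ y q, q ∈ U.filter (cfaBkt y) →
        PySem.List.slice arr (some i) (some (i + (q.length : Int))) ≠ q
  | [], h, _ => by simp [cfaFM] at h
  | q₀ :: rest, h, hP => by
    intro y q hq
    simp only [cfaFM] at h
    by_cases hs : PySem.List.slice arr (some i) (some (i + (q₀.length : Int))) = q₀
    · rw [if_pos hs] at h
      simp only [Option.some.injEq] at h
      subst h
      exfalso
      rw [List.filter_cons_of_neg (by simp [cfaBkt])] at hq
      have hmem := List.mem_of_mem_filter hq
      have hlen : q.length ≤ 0 := (List.pairwise_cons.mp hP).1 q hmem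
      have hq0 : q = [] := by
        cases q with
        | nil => rfl
        | cons a t => simp at hlen
      subst hq0
      have : cfaBkt y ([] : List Int) = true := List.of_mem_filter hq
      simp [cfaBkt] at this
    · rw [if_neg hs] at h
      rw [List.filter_cons] at hq
      by_cases hb : cfaBkt y q₀ = true
      · rw [if_pos hb] at hq
        rcases List.mem_cons.mp hq with rfl | hq'
        · exact hs
        · exact cfa_L3 arr i rest h (List.pairwise_cons.mp hP).2 y q hq'
      · rw [if_neg hb] at hq
        exact cfa_L3 arr i rest h (List.pairwise_cons.mp hP).2 y q hq

-- L4: erasing an empty first match leaves every bucket unchanged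
lemma cfa_L4 (arr : List Int) (i : Int) :
    ∀ (U : List (List Int)), cfaFM arr i U = some [] →
      ∀ y, (cfaErase arr i U).filter (cfaBkt y) = U.filter (cfaBkt y)
  | [], h => by simp [cfaFM] at h
  | q :: rest, h => by
    intro y
    simp only [cfaFM] at h
    by_cases hs : PySem.List.slice arr (some i) (some (i + (q.length : Int))) = q
    · rw [if_pos hs] at h
      simp only [Option.some.injEq] at h
      subst h
      simp only [cfaErase]
      rw [if_pos hs, List.filter_cons_of_neg (by simp [cfaBkt])]
    · rw [if_neg hs] at h
      simp only [cfaErase]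
      rw [if_neg hs, List.filter_cons, List.filter_cons]
      rw [cfa_L4 arr i rest h y]

lemma cfaScan_none (arr : List Int) (i : Int) : ∀ (l : List (List Int)),
    canFormArrayScan arr i l = none ↔ cfaFM arr i l = none
  | [] => by simp [canFormArrayScan, cfaFM]
  | p :: rest => by
    simp only [canFormArrayScan, cfaFM]
    by_cases hs : PySem.List.slice arr (some i) (some (i + (p.length : Int))) = p
    · simp [hs]
    · rw [if_neg hs, if_neg hs]
      rw [← cfaScan_none arr i rest]
      rcases canFormArrayScan arr i rest with _ | ⟨q, r⟩ <;> simp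

lemma cfaScan_some (arr : List Int) (i : Int) : ∀ (l : List (List Int)) (p : List Int) (rest : List (List Int)),
    canFormArrayScan arr i l = some (p, rest) →
    cfaFM arr i l = some p ∧ rest = cfaErase arr i l
  | [], p, rest, h => by simp [canFormArrayScan] at h
  | q :: tl, p, rest, h => by
    simp only [canFormArrayScan] at h
    by_cases hs : PySem.List.slice arr (some i) (some (i + (q.length : Int))) = q
    · rw [if_pos hs] at h
      simp only [Option.some.injEq, Prod.mk.injEq] at h
      obtain ⟨rfl, rfl⟩ := h
      simp only [cfaFM, cfaErase]
      rw [if_pos hs, if_pos hs]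
      exact ⟨rfl, rfl⟩
    · rw [if_neg hs] at h
      rcases hrec : canFormArrayScan arr i tl with _ | ⟨q', rest'⟩
      · rw [hrec] at h; simp at h
      · rw [hrec] at h
        simp only [Option.some.injEq, Prod.mk.injEq] at h
        obtain ⟨rfl, rfl⟩ := h
        obtain ⟨h1, h2⟩ := cfaScan_some arr i tl q' rest' hrec
        simp only [cfaFM, cfaErase]
        rw [if_neg hs, if_neg hs, h1, ← h2]
        exact ⟨rfl, rfl⟩

-- the bucket-building fold, characterised per key
lemma cfa_build (x : Int) : ∀ (l : List (List Int)) (d : PySem.Dict Int (List (List Int))),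
    (l.foldl (fun d p => match p with
      | [] => d
      | q :: _ => d.modify q [] (fun l => l ++ [p])) d).getD x [] =
    d.getD x [] ++ l.filter (cfaBkt x)
  | [], d => by simp
  | p :: rest, d => by
    cases p with
    | nil =>
      simp only [List.foldl_cons, List.filter_cons]
      rw [cfa_build x rest d]
      rfl
    | cons q t =>
      simp only [List.foldl_cons, List.filter_cons]
      rw [cfa_build x rest (d.modify q [] (fun l => l ++ [q :: t]))]
      rw [PySem.Dict.getD_modify]
      by_cases hx : x = q
      · subst hx
        simp [cfaBkt, List.append_assoc]
      · have hb : ¬ cfaBkt x (q :: t) = true := by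
          simp only [cfaBkt, beq_iff_eq]
          omega
        rw [if_neg hx, if_neg hb]

-- the simulation: A's loop over (i, seen) equals B's loop over (i, buckets)
lemma cfa_main (arr : List Int) (sortedP : List (List Int)) (m : Int) :
    ∀ (fuelA : Nat) (i : Int) (seen : PySem.Set Int)
      (d : PySem.Dict Int (List (List Int))) (fuelB : Nat),
      (cfaUnused seen 0 sortedP).length + ((arr.length : Int) - i).toNat < fuelA →
      ((arr.length : Int) - i).toNat < fuelB →
      0 ≤ i →
      (cfaUnused seen 0 sortedP).Pairwise (fun a b => b.length ≤ a.length) →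
      (∀ x, d.getD x [] = (cfaUnused seen 0 sortedP).filter (cfaBkt x)) →
      canFormArrayLoop arr sortedP (arr.length : Int) m fuelA i seen =
        canFormArrayAltLoop arr (arr.length : Int) m fuelB i d := by
  intro fuelA
  induction fuelA with
  | zero => intro i seen d fuelB hA; omega
  | succ fuelA ih =>
    intro i seen d fuelB hA hB hi hP hInv
    obtain ⟨fB, rfl⟩ : ∃ fB, fuelB = fB + 1 := ⟨fuelB - 1, by omega⟩
    by_cases hin : i < (arr.length : Int)
    · rcases hfind : canFormArrayFind arr i seen 0 sortedP with _ | ⟨j₀, p⟩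
      · -- nothing matches: both sides return false
        have hfm : cfaFM arr i (cfaUnused seen 0 sortedP) = none := by
          have h1 := cfaFind_map arr i seen sortedP 0
          rw [hfind] at h1
          exact h1.symm ▸ rfl
        have hbfm : cfaFM arr i (d.getD (PySem.List.pyGetD arr i 0) []) = none := by
          rw [hInv, cfaFM_none_iff]
          intro q hq
          exact (cfaFM_none_iff arr i _).mp hfm q (List.mem_of_mem_filter hq)
        simp [canFormArrayLoop, canFormArrayAltLoop, hin, hfind,
          (cfaScan_none arr i _).mpr hbfm]
      · have hfm : cfaFM arr i (cfaUnused seen 0 sortedP) = some p := by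
          have h1 := cfaFind_map arr i seen sortedP 0
          rw [hfind] at h1
          exact h1.symm
        have hUerase := cfaFind_erase arr i seen sortedP 0 j₀ p hfind
        have hlen := cfaErase_length arr i _ p hfm
        by_cases hp : p = []
        · -- the matched piece is empty: B fails here, A marks it seen and retries
          subst hp
          have hbfm : cfaFM arr i (d.getD (PySem.List.pyGetD arr i 0) []) = none := by
            rw [hInv, cfaFM_none_iff]
            exact fun q hq => cfa_L3 arr i _ hfm hP (PySem.List.pyGetD arr i 0) q hq
          have hstep : canFormArrayAltLoop arr (arr.length : Int) m (fB + 1) i d = false := by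
            simp [canFormArrayAltLoop, hin, (cfaScan_none arr i _).mpr hbfm]
          have hrec := ih i (PySem.Set.add seen j₀) d (fB + 1)
            (by rw [hUerase]; omega) hB hi
            (by rw [hUerase]
                exact hP.sublist (cfaErase_sublist arr i _))
            (by intro x
                rw [hUerase, cfa_L4 arr i _ hfm x]
                exact hInv x)
          simp only [canFormArrayLoop, hin, if_true, hfind]
          rw [hstep]
          simp only [List.length_nil, Nat.cast_zero, add_zero]
          rw [hrec, hstep]
        · -- non-empty match: both sides consume p
          obtain ⟨hslice, -⟩ := cfaFM_some arr i _ p hfm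
          have hple := cfa_match_le arr i p hi hslice
          obtain ⟨hbfm, hberase⟩ := cfa_L2 arr i p hi hin hp _ hfm
          rw [← hInv (PySem.List.pyGetD arr i 0)] at hbfm hberase
          rcases hscan : canFormArrayScan arr i (d.getD (PySem.List.pyGetD arr i 0) []) with _ | ⟨q, rest⟩
          · rw [(cfaScan_none arr i _).mp hscan] at hbfm
            simp at hbfm
          · obtain ⟨hq1, hq2⟩ := cfaScan_some arr i _ q rest hscan
            rw [hbfm] at hq1
            injection hq1 with hq1
            subst hq1
            have hplen : 1 ≤ p.length := by
              cases p with
              | nil => exact absurd rfl hp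
              | cons a t => simp
            have hrec := ih (i + (p.length : Int)) (PySem.Set.add seen j₀)
              (d.insert (PySem.List.pyGetD arr i 0) rest) fB
              (by rw [hUerase]; omega)
              (by omega)
              (by omega)
              (by rw [hUerase]
                  exact hP.sublist (cfaErase_sublist arr i _))
              (by intro x
                  rw [hUerase]
                  by_cases hx : x = PySem.List.pyGetD arr i 0
                  · subst hx
                    rw [PySem.Dict.getD_insert_self, hq2, hberase]
                  · rw [PySem.Dict.getD_insert_of_ne _ _ _ hx, hInv x,
                      cfa_L2' arr i p hi hin hp _ hfm x hx])
            simp only [canFormArrayLoop, canFormArrayAltLoop, hin, if_true, hfind, hscan]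
            exact hrec
    · simp [canFormArrayLoop, canFormArrayAltLoop, hin]

-- ===== VERDICT (by name: the statement is the Claim_ definition above) =====
theorem canFormArray_spec : Claim_equal_canFormArray := by
  intro arr pieces _
  unfold Spec_canFormArray canFormArray canFormArray_alt
  have hm : ((PySem.List.sorted pieces (fun x => -((x.length : Nat) : Int)) false).map
      (fun p => ((p.length : Nat) : Int))).sum = (pieces.map (fun p => ((p.length : Nat) : Int))).sum :=
    ((PySem.List.sorted_perm pieces (fun x => -((x.length : Nat) : Int)) false).map _).sum_eq
  simp only []
  rw [hm]
  apply cfa_main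
  · rw [cfaUnused_empty]
    rw [PySem.List.length_sorted]
    omega
  · omega
  · omega
  · rw [cfaUnused_empty]
    exact (PySem.List.sorted_pairwise pieces (fun x => -((x.length : Nat) : Int))).imp
      (fun h => by omega)
  · intro x
    rw [cfa_build, cfaUnused_empty]
    simp [PySem.Dict.getD_empty]
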